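-- pv_equiv track=rewrite | github.com/GreenClothes/ALGORITHM | BAEKJOON/coding_test/PART2/2504.py | pair_check
-- ===== SOURCE A (Python) =====
-- def pair_check(s):
--     stack = []
--     pair = {')': '(', ']': '['}
--     tmp = 1
--     ans = 0
--
--     for i in range(len(s)):
--         if s[i] in pair:
--             if not stack or stack[-1] != pair[s[i]]:
--                 return 0
--             p = stack.pop()
--             if p == '(':
--                 if s[i-1] == p:
--                     ans += tmp
--                 tmp //= 2
--             else:
--                 if s[i-1] == p:
--                     ans += tmp
--                 tmp //= 3
--         else:
--             if s[i] == '(':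
--                 tmp *= 2
--             else:
--                 tmp *= 3
--             stack.append(s[i])
--     if stack: return 0
--     else: return ans
-- ===== SOURCE B (Python) =====
-- def pair_check(s):
--     # value-accumulating stack: partial bracket values live on the stack
--     # instead of A's global tmp/ans pair
--     stack = []
--     for c in s:
--         if c == ')' or c == ']':
--             v = 0
--             while stack and isinstance(stack[-1], int):
--                 v += stack.pop()
--             need = '(' if c == ')' else '['
--             if not stack or stack[-1] != need:
--                 return 0
--             stack.pop()
--             stack.append((2 if c == ')' else 3) * (v or 1))
--         else:
--             stack.append(c)
--     total = 0
--     for x in stack: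
--         if isinstance(x, str):
--             return 0
--         total += x
--     return total
-- ===== Notes on version B (the rewrite author's own statement) =====
-- stated objective: alternative
-- what changed: B replaces A's global tmp (a running product of per-char weights that becomes a huge bignum on long inputs) and ans accumulator plus the s[i-1] look-back with a value-accumulating stack: each closed bracket group's value is computed locally (2 or 3 times the sum of inner values, or 1 if empty) and the answer is the sum of the values left on the stack; avoiding A's ever-growing bignum tmp is what a timing run measured as faster.
import Mathlib
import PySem

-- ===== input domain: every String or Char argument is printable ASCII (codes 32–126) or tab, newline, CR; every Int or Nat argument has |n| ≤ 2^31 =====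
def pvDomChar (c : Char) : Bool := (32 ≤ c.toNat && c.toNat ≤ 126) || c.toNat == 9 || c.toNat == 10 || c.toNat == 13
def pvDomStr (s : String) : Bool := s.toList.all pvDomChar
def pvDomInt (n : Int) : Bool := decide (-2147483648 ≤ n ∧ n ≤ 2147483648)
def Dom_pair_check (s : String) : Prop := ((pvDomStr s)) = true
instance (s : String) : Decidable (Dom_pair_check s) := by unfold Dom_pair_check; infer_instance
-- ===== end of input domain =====

-- B replaces A's global tmp/ans counters with a value-accumulating stack (partial
-- bracket values are kept on the stack); alternative decomposition, same cost.


-- ===== PORT A =====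
-- literal port of A: index loop over range(len(s)) with stack of chars, tmp, ans
def pairCheckGo (cs : List Char) (n i : Nat) (stack : List Char) (tmp ans : Int) : Int :=
  if _h : i < n then
    if cs.getD i ' ' = ')' ∨ cs.getD i ' ' = ']' then   -- s[i] in pair
      match stack with
      | [] => 0                                         -- not stack → return 0
      | p :: rest =>                                    -- p = stack.pop()
        if p ≠ (if cs.getD i ' ' = ')' then '(' else '[') then 0   -- stack[-1] != pair[s[i]]
        else
          if p = '(' then
            pairCheckGo cs n (i + 1) rest (PySem.Int.floordiv tmp 2)
              (if (PySem.List.pyGet? cs ((i : Int) - 1)).getD ' ' = p then ans + tmp else ans)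
          else
            pairCheckGo cs n (i + 1) rest (PySem.Int.floordiv tmp 3)
              (if (PySem.List.pyGet? cs ((i : Int) - 1)).getD ' ' = p then ans + tmp else ans)
    else
      pairCheckGo cs n (i + 1) (cs.getD i ' ' :: stack)
        (if cs.getD i ' ' = '(' then tmp * 2 else tmp * 3) ans
  else
    if stack ≠ [] then 0 else ans
termination_by n - i

def pair_check (s : String) : Int :=
  pairCheckGo s.toList s.toList.length 0 [] 1 0

-- ===== PORT B =====
-- B's stack entries: Sum.inl c = a pushed character, Sum.inr v = a computed value.
-- the inner while loop: pop and sum the contiguous ints on top of the stack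
def pvPopInts : List (Char ⊕ Int) → Int × List (Char ⊕ Int)
  | Sum.inr v :: rest =>
    match pvPopInts rest with
    | (v', st) => (v + v', st)
  | st => (0, st)

-- the final for loop: return 0 on any remaining char, else the total
-- (Python iterates bottom→top, i.e. the reverse of our top-first list)
def pvFinal : List (Char ⊕ Int) → Int → Int
  | [], total => total
  | Sum.inl _ :: _, _ => 0
  | Sum.inr v :: rest, total => pvFinal rest (total + v)

def pairCheckAltGo : List Char → List (Char ⊕ Int) → Int
  | [], stack => pvFinal stack.reverse 0
  | c :: rest, stack =>
    if c = ')' ∨ c = ']' then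
      match pvPopInts stack with
      | (v, Sum.inl p :: st') =>
        if p = (if c = ')' then '(' else '[') then
          pairCheckAltGo rest
            (Sum.inr ((if c = ')' then 2 else 3) * (if v = 0 then 1 else v)) :: st')
        else 0
      | _ => 0
    else
      pairCheckAltGo rest (Sum.inl c :: stack)

def pair_check_alt (s : String) : Int :=
  pairCheckAltGo s.toList []

-- ===== PRECONDITION & SPEC =====
def Spec_pair_check (s : String) (out : Int) : Prop := out = pair_check_alt s
instance (s : String) (out : Int) : Decidable (Spec_pair_check s out) := by unfold Spec_pair_check; infer_instance

-- ===== CLAIM (what is proved, stated in full; the proofs are below) =====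
def Claim_equal_pair_check : Prop := ∀ (s : String), Dom_pair_check s → Spec_pair_check s (pair_check s)

-- ===== LEMMAS AND PROOFS =====

-- proof helpers: project B's stack onto A's state
def pvWeight (c : Char) : Int := if c = '(' then 2 else 3

def pvChars : List (Char ⊕ Int) → List Char
  | [] => []
  | Sum.inl c :: rest => c :: pvChars rest
  | Sum.inr _ :: rest => pvChars rest

def pvProdW : List (Char ⊕ Int) → Int
  | [] => 1
  | Sum.inl c :: rest => pvWeight c * pvProdW rest
  | Sum.inr _ :: rest => pvProdW rest

def pvSumVals : List (Char ⊕ Int) → Int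
  | [] => 0
  | Sum.inl _ :: rest => pvSumVals rest
  | Sum.inr v :: rest => v * pvProdW rest + pvSumVals rest

def pvValsSum : List (Char ⊕ Int) → Int
  | [] => 0
  | Sum.inl _ :: rest => pvValsSum rest
  | Sum.inr v :: rest => v + pvValsSum rest

def pvIsVal : (Char ⊕ Int) → Bool
  | Sum.inl _ => false
  | Sum.inr _ => true

-- the "prev-char" link between A's s[i-1] test and B's stack top
def pvLink (cs : List Char) (i : Nat) (st : List (Char ⊕ Int)) : Prop :=
  match st with
  | [] => True
  | Sum.inl c :: _ => 0 < i ∧ cs.getD (i - 1) ' ' = c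
  | Sum.inr _ :: _ => 0 < i ∧
      (cs.getD (i - 1) ' ' = ')' ∨ cs.getD (i - 1) ' ' = ']')

def pvPos (st : List (Char ⊕ Int)) : Prop := ∀ v : Int, Sum.inr v ∈ st → 0 < v

theorem pvValsSum_append (a b : List (Char ⊕ Int)) :
    pvValsSum (a ++ b) = pvValsSum a + pvValsSum b := by
  induction a with
  | nil => simp [pvValsSum]
  | cons x rest ih => cases x <;> simp [pvValsSum, ih] <;> ring

theorem pvValsSum_reverse (l : List (Char ⊕ Int)) :
    pvValsSum l.reverse = pvValsSum l := by
  induction l with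
  | nil => rfl
  | cons x rest ih =>
    cases x <;> simp [List.reverse_cons, pvValsSum_append, pvValsSum, ih] <;> ring

theorem pvFinal_all_val (l : List (Char ⊕ Int)) (t : Int)
    (h : ∀ x ∈ l, pvIsVal x = true) :
    pvFinal l t = t + pvValsSum l := by
  induction l generalizing t with
  | nil => simp [pvFinal, pvValsSum]
  | cons x rest ih =>
    cases x with
    | inl c =>
      have := h (Sum.inl c) (by simp)
      simp [pvIsVal] at this
    | inr v =>
      simp only [pvFinal, pvValsSum]
      rw [ih _ (fun x hx => h x (by simp [hx]))]
      ring

theorem pvFinal_has_char (l : List (Char ⊕ Int)) (t : Int) (c : Char)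
    (h : Sum.inl c ∈ l) : pvFinal l t = 0 := by
  induction l generalizing t with
  | nil => simp at h
  | cons x rest ih =>
    cases x with
    | inl d => simp [pvFinal]
    | inr v =>
      simp only [List.mem_cons, reduceCtorEq, false_or] at h
      simp [pvFinal, ih _ h]

theorem pvChars_nil_all_val (st : List (Char ⊕ Int)) (h : pvChars st = []) :
    ∀ x ∈ st, pvIsVal x = true := by
  induction st with
  | nil => simp
  | cons x rest ih =>
    cases x with
    | inl c => simp [pvChars] at h
    | inr v =>
      intro y hy
      rcases List.mem_cons.1 hy with rfl | hy
      · rfl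
      · exact ih (by simpa [pvChars] using h) y hy

theorem pvProdW_no_chars (st : List (Char ⊕ Int)) (h : pvChars st = []) :
    pvProdW st = 1 := by
  induction st with
  | nil => rfl
  | cons x rest ih =>
    cases x with
    | inl c => simp [pvChars] at h
    | inr v => simpa [pvProdW] using ih (by simpa [pvChars] using h)

theorem pvSumVals_no_chars (st : List (Char ⊕ Int)) (h : pvChars st = []) :
    pvSumVals st = pvValsSum st := by
  induction st with
  | nil => rfl
  | cons x rest ih =>
    cases x with
    | inl c => simp [pvChars] at h
    | inr v =>
      have h' : pvChars rest = [] := by simpa [pvChars] using h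
      simp [pvSumVals, pvValsSum, ih h', pvProdW_no_chars rest h']

theorem pvChars_mem (st : List (Char ⊕ Int)) (c : Char) (h : c ∈ pvChars st) :
    Sum.inl c ∈ st := by
  induction st with
  | nil => simp [pvChars] at h
  | cons x rest ih =>
    cases x with
    | inl d =>
      simp only [pvChars, List.mem_cons] at h
      rcases h with rfl | h
      · simp
      · exact List.mem_cons_of_mem _ (ih h)
    | inr v => exact List.mem_cons_of_mem _ (ih (by simpa [pvChars] using h))

-- pvPopInts preserves the projections and strips exactly the leading values
theorem pvPopInts_spec (st : List (Char ⊕ Int)) (hpos : pvPos st) :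
    pvChars (pvPopInts st).2 = pvChars st ∧
    pvProdW (pvPopInts st).2 = pvProdW st ∧
    pvSumVals st = (pvPopInts st).1 * pvProdW st + pvSumVals (pvPopInts st).2 ∧
    0 ≤ (pvPopInts st).1 ∧
    (∀ c rest', st = Sum.inl c :: rest' → (pvPopInts st).1 = 0 ∧ (pvPopInts st).2 = st) ∧
    (∀ v rest', st = Sum.inr v :: rest' → 0 < (pvPopInts st).1) ∧
    (∀ x rest', (pvPopInts st).2 = x :: rest' → pvIsVal x = false) ∧
    pvPos (pvPopInts st).2 := by
  induction st with
  | nil =>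
    refine ⟨rfl, rfl, by simp [pvPopInts, pvSumVals], by simp [pvPopInts], ?_, ?_, ?_, ?_⟩
    · intro c rest' h; simp at h
    · intro v rest' h; simp at h
    · intro x rest' h; simp [pvPopInts] at h
    · simp [pvPopInts]; intro v h; simp at h
  | cons x rest ih =>
    cases x with
    | inl c =>
      have hid : pvPopInts (Sum.inl c :: rest) = (0, Sum.inl c :: rest) := rfl
      refine ⟨by rw [hid], by rw [hid], by rw [hid]; simp, by rw [hid], ?_, ?_, ?_, ?_⟩
      · intro _ _ _; rw [hid]; exact ⟨rfl, rfl⟩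
      · intro v rest' h; simp at h
      · intro x rest' h
        rw [hid] at h
        obtain ⟨rfl, _⟩ := List.cons_eq_cons.1 h
        rfl
      · rw [hid]; exact hpos
    | inr v =>
      have hv : 0 < v := hpos v (by simp)
      have hpos' : pvPos rest := fun w hw => hpos w (List.mem_cons_of_mem _ hw)
      obtain ⟨h1, h2, h3, h4, _, _, h7, h8⟩ := ih hpos'
      have hstep : pvPopInts (Sum.inr v :: rest) =
          (v + (pvPopInts rest).1, (pvPopInts rest).2) := by
        show (match pvPopInts rest with
          | (v', st) => (v + v', st)) = _
        rfl
      refine ⟨?_, ?_, ?_, ?_, ?_, ?_, ?_, ?_⟩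
      · rw [hstep]; simpa [pvChars] using h1
      · rw [hstep]; simpa [pvProdW] using h2
      · rw [hstep]
        simp only [pvSumVals, pvProdW]
        rw [h3, ← h2]; ring
      · rw [hstep]; simp only; omega
      · intro c rest' h; simp at h
      · intro w rest' _; rw [hstep]; simp only; omega
      · intro x rest' h; rw [hstep] at h; exact h7 x rest' h
      · rw [hstep]; exact h8

-- main invariant: A's index loop equals B's suffix loop under the projection
theorem pvMain (cs : List Char) :
    ∀ (k i : Nat) (st : List (Char ⊕ Int)), i + k = cs.length →
      pvLink cs i st → pvPos st →
      pairCheckGo cs cs.length i (pvChars st) (pvProdW st) (pvSumVals st) =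
        pairCheckAltGo (cs.drop i) st := by
  intro k
  induction k with
  | zero =>
    intro i st hik hlink hpos
    have hi : i = cs.length := by omega
    subst hi
    rw [List.drop_length, pairCheckGo.eq_def]
    simp only [lt_irrefl, dite_false]
    by_cases hch : pvChars st = []
    · have hall := pvChars_nil_all_val st hch
      simp only [pairCheckAltGo]
      rw [pvFinal_all_val _ _ (fun x hx => hall x (List.mem_reverse.1 hx))]
      rw [pvValsSum_reverse]
      simp [hch, pvSumVals_no_chars st hch]
    · obtain ⟨c, rest, hce⟩ := List.exists_cons_of_ne_nil hch
      have hmem : Sum.inl c ∈ st := pvChars_mem st c (by rw [hce]; simp)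
      simp only [pairCheckAltGo]
      rw [pvFinal_has_char _ _ c (List.mem_reverse.2 hmem)]
      simp [hch]
  | succ k ih =>
    intro i st hik hlink hpos
    have hi : i < cs.length := by omega
    have hdrop : cs.drop i = cs[i] :: cs.drop (i + 1) := List.drop_eq_getElem_cons hi
    have hgetD : cs.getD i ' ' = cs[i] := List.getD_eq_getElem cs ' ' hi
    rw [pairCheckGo.eq_def]
    simp only [hi, dite_true, hgetD]
    rw [hdrop]
    by_cases hcl : cs[i] = ')' ∨ cs[i] = ']'
    · -- closing char: unfold B's step
      obtain ⟨h1, h2, h3, h4, h5, h6, h7, h8⟩ := pvPopInts_spec st hpos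
      obtain ⟨v, st0, hpe⟩ : ∃ v st0, pvPopInts st = (v, st0) := ⟨_, _, rfl⟩
      rw [hpe] at h1 h2 h3 h4 h7 h8
      simp only at h1 h2 h3 h4 h7 h8
      have hB : pairCheckAltGo (cs[i] :: cs.drop (i+1)) st =
          (match (v, st0) with
            | (v, Sum.inl p :: st') =>
              if p = (if cs[i] = ')' then '(' else '[') then
                pairCheckAltGo (cs.drop (i+1))
                  (Sum.inr ((if cs[i] = ')' then 2 else 3) * (if v = 0 then 1 else v)) :: st')
              else 0
            | _ => (0:Int)) := by
        simp only [pairCheckAltGo, hcl, if_true, hpe]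
      rw [hB]
      simp only [hcl, if_true]
      match hst0 : st0 with
      | [] =>
        have hch : pvChars st = [] := h1.symm
        rw [hch]
      | Sum.inr w :: st'' =>
        have := h7 (Sum.inr w) st'' rfl
        simp [pvIsVal] at this
      | Sum.inl p :: st'' =>
        have hch : pvChars st = p :: pvChars st'' := h1.symm
        rw [hch]
        by_cases hpn : p = (if cs[i] = ')' then '(' else '[')
        · simp only [hpn, ne_eq, not_true_eq_false, if_false, if_true]
          set need : Char := if cs[i] = ')' then '(' else '[' with hneed
          -- basic facts
          have hstne : st ≠ [] := by
            intro h; rw [h] at hpe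
            simp [pvPopInts] at hpe
          have hw : pvWeight need = if cs[i] = ')' then 2 else 3 := by
            rcases hcl with h | h <;> simp [pvWeight, hneed, h]
          have hprod : pvProdW st = pvWeight need * pvProdW st'' := by
            rw [← hpn, ← h2]; rfl
          have hi0 : 0 < i := by
            cases hst : st with
            | nil => exact absurd hst hstne
            | cons x r =>
              cases x with
              | inl d => exact (hst ▸ hlink : pvLink cs i (Sum.inl d :: r)).1
              | inr w => exact (hst ▸ hlink : pvLink cs i (Sum.inr w :: r)).1
          have hprev' : (PySem.List.pyGet? cs ((i:Int) - 1)).getD ' ' = cs.getD (i-1) ' ' := by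
            have hcast : ((i:Int) - 1) = ((i - 1 : Nat) : Int) := by omega
            rw [hcast, PySem.List.pyGet?_natCast, List.getD_eq_getElem?_getD]
          -- the value pushed by B
          set newv : Int := (if cs[i] = ')' then 2 else 3) * (if v = 0 then 1 else v) with hnewv
          have hnewpos : pvPos (Sum.inr newv :: st'') := by
            intro w hw'
            rcases List.mem_cons.1 hw' with heq | hmem
            · have hwpos : (0:Int) < (if cs[i] = ')' then 2 else 3) := by
                by_cases h : cs[i] = ')' <;> simp [h]
              have hvp : (0:Int) < (if v = 0 then 1 else v) := by
                by_cases hv0 : v = 0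
                · simp [hv0]
                · simp only [hv0, if_false]; omega
              have := mul_pos hwpos hvp
              simp only [Sum.inr.injEq] at heq
              omega
            · exact h8 w (List.mem_cons_of_mem _ hmem)
          have hnewlink : pvLink cs (i+1) (Sum.inr newv :: st'') := by
            refine ⟨by omega, ?_⟩
            simp only [Nat.add_sub_cancel]
            rw [List.getD_eq_getElem cs ' ' hi]
            exact hcl
          have hrec := ih (i+1) (Sum.inr newv :: st'') (by omega) hnewlink hnewpos
          have hch2 : pvChars (Sum.inr newv :: st'') = pvChars st'' := rfl
          have hpw2 : pvProdW (Sum.inr newv :: st'') = pvProdW st'' := rfl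
          have hsv2 : pvSumVals (Sum.inr newv :: st'') = newv * pvProdW st'' + pvSumVals st'' := rfl
          rw [hch2, hpw2, hsv2] at hrec
          -- ans update identical in both '(' and '[' sub-branches
          have hans : (if (PySem.List.pyGet? cs ((i:Int) - 1)).getD ' ' = need
                then pvSumVals st + pvProdW st else pvSumVals st)
              = newv * pvProdW st'' + pvSumVals st'' := by
            rw [hprev', hnewv, ← hpn]
            have hwc : (if cs[i] = ')' then (2:Int) else 3) = pvWeight need := hw.symm
            by_cases hv0 : v = 0
            · -- no values above the opener: prev char is the opener itself
              have hstq : st = Sum.inl p :: st'' := by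
                cases hst : st with
                | nil => exact absurd hst hstne
                | cons x r =>
                  cases x with
                  | inl d =>
                    obtain ⟨_, hid⟩ := h5 d r hst
                    rw [hpe] at hid
                    simp only at hid
                    rw [← hst]; exact hid.symm
                  | inr w =>
                    have := h6 w r hst
                    rw [hpe] at this
                    simp only at this
                    omega
              have hprevp : cs.getD (i-1) ' ' = p := by
                have hl := hlink
                rw [hstq] at hl
                exact hl.2
              have hsv : pvSumVals st = pvSumVals st'' := by rw [hstq]; rfl
              simp only [hprevp, if_true, hv0, if_true, hwc]
              rw [hsv, hprod, mul_one]
              ring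
            · -- values above the opener: prev char is a closer, ≠ p
              have hprevne : cs.getD (i-1) ' ' ≠ p := by
                have hst0' : ∃ w r, st = Sum.inr w :: r := by
                  cases hst : st with
                  | nil => exact absurd hst hstne
                  | cons x r =>
                    cases x with
                    | inl d =>
                      obtain ⟨hz, _⟩ := h5 d r hst
                      rw [hpe] at hz
                      simp only at hz
                      exact absurd hz hv0
                    | inr w => exact ⟨w, r, rfl⟩
                obtain ⟨w, r, hstq⟩ := hst0'
                have hl := hlink; rw [hstq] at hl
                have hpop : p = '(' ∨ p = '[' := by
                  rw [hpn, hneed]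
                  by_cases h : cs[i] = ')' <;> simp [h]
                rcases hl.2 with hcp | hcp <;> rw [hcp] <;>
                  rcases hpop with rfl | rfl <;> decide
              simp only [hprevne, if_false, hv0, if_false, hwc]
              have hsv' : pvSumVals (Sum.inl p :: st'') = pvSumVals st'' := rfl
              rw [hsv'] at h3
              rw [h3, hprod]
              ring
          -- tmp update: division by the matching weight is exact
          by_cases hp2 : need = '('
          · have hwv : pvWeight need = 2 := by simp [pvWeight, hp2]
            have hdiv : PySem.Int.floordiv (pvProdW st) 2 = pvProdW st'' := by
              rw [hprod, hwv, PySem.Int.floordiv_eq_ediv_of_pos (by omega)]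
              omega
            rw [if_pos hp2, hdiv, hans]
            exact hrec
          · have hwv : pvWeight need = 3 := by simp [pvWeight, hp2]
            have hdiv : PySem.Int.floordiv (pvProdW st) 3 = pvProdW st'' := by
              rw [hprod, hwv, PySem.Int.floordiv_eq_ediv_of_pos (by omega)]
              omega
            rw [if_neg hp2, hdiv, hans]
            exact hrec
        · -- mismatch: both return 0
          simp only [ne_eq, hpn, not_false_eq_true, if_true, if_false]
    · -- opener / other char: push
      have hB : pairCheckAltGo (cs[i] :: cs.drop (i+1)) st =
          pairCheckAltGo (cs.drop (i+1)) (Sum.inl cs[i] :: st) := by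
        simp only [pairCheckAltGo, hcl, if_false]
      rw [hB]
      simp only [hcl, if_false]
      have hnewlink : pvLink cs (i+1) (Sum.inl cs[i] :: st) := by
        refine ⟨by omega, ?_⟩
        simp only [Nat.add_sub_cancel]
        exact List.getD_eq_getElem cs ' ' hi
      have hnewpos : pvPos (Sum.inl cs[i] :: st) := by
        intro w hw
        rcases List.mem_cons.1 hw with h | h
        · simp at h
        · exact hpos w h
      have hrec := ih (i+1) (Sum.inl cs[i] :: st) (by omega) hnewlink hnewpos
      have hch : pvChars (Sum.inl cs[i] :: st) = cs[i] :: pvChars st := rfl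
      have hpw : pvProdW (Sum.inl cs[i] :: st) = pvWeight cs[i] * pvProdW st := rfl
      have hsv : pvSumVals (Sum.inl cs[i] :: st) = pvSumVals st := rfl
      rw [hch, hpw, hsv] at hrec
      have hwe : (if cs[i] = '(' then pvProdW st * 2 else pvProdW st * 3)
          = pvWeight cs[i] * pvProdW st := by
        by_cases h : cs[i] = '(' <;> simp [pvWeight, h] <;> ring
      rw [hwe]
      exact hrec

-- ===== VERDICT (by name: the statement is the Claim_ definition above) =====
theorem pair_check_spec : Claim_equal_pair_check := by
  intro s _
  unfold Spec_pair_check pair_check pair_check_alt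
  have h := pvMain s.toList s.toList.length 0 [] (by omega) trivial
    (by intro v h; simp at h)
  simpa [pvChars, pvProdW, pvSumVals] using h
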